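-- pv_equiv track=rewrite | github.com/Zehruddin/Wipro-Talent-Next- | weightofstring.py | Weight_of_String
-- ===== SOURCE A (Python) =====
-- def Weight_of_String(input1,input2):
--         ab=['a','b','c','d','e','f','g','h','i','j','k','l','m','n','o','p','q','r','s','t','u','v','w','x','y','z']
--         no=[1,2,3,4,5,6,7,8,9,10,11,12,13,14,15,16,17,18,19,20,21,22,23,24,25,26]
--         dic=dict(zip(ab,no))
--         vow="aeiou"
--         weight=0
--
--         for i in input1.lower():
--             if i.isalpha():
--                 if input2==0:
--                     if i not in vow:
--                         weight+=dic[i]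
--                 else:
--                     weight+=dic[i]
--         return weight
-- ===== SOURCE B (Python) =====
-- def Weight_of_String(input1, input2):
--     counts = {}
--     for ch in input1.lower():
--         counts[ch] = counts.get(ch, 0) + 1
--     letters = "abcdefghijklmnopqrstuvwxyz" if input2 != 0 else "bcdfghjklmnpqrstvwxyz"
--     total = 0
--     for c in letters:
--         total += counts.get(c, 0) * (ord(c) - 96)
--     return total
-- ===== Notes on version B (the rewrite author's own statement) =====
-- stated objective: alternative
-- what changed: B builds a character-count dict over input1.lower() in one pass and then sums count*(ord(c)-96) over the fixed included-letter list (all 26 letters, or the 21 consonants when input2==0), replacing A's per-character scan with its hand-built zip dict and per-character vowel test.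
import Mathlib
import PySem

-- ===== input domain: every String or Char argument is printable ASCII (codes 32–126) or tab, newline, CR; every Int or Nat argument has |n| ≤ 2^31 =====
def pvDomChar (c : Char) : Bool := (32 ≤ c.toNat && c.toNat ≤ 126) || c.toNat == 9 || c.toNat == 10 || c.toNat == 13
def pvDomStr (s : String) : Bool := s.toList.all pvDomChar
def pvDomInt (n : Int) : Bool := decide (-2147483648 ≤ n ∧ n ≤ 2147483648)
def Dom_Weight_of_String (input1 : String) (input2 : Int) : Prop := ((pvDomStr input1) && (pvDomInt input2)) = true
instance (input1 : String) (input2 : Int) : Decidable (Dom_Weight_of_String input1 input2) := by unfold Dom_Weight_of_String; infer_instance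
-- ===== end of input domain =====

-- B aggregates per distinct letter (one counting pass, then a 21/26-letter weighted sum using ord
-- arithmetic) instead of A's per-character scan through a hand-built weight dict: objective 'alternative'.


-- ===== PORT A =====
def Weight_of_String (input1 : String) (input2 : Int) : Int :=
  let ab : List Char := ['a','b','c','d','e','f','g','h','i','j','k','l','m','n','o','p','q','r','s','t','u','v','w','x','y','z']
  let no : List Int := [1,2,3,4,5,6,7,8,9,10,11,12,13,14,15,16,17,18,19,20,21,22,23,24,25,26]
  let dic : PySem.Dict Char Int := PySem.Dict.ofList (ab.zip no)
  let vow : List Char := "aeiou".toList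
  -- dic[i]: getD 0 stands for the lookup; on the stated printable-ASCII domain every lowered
  -- alphabetic character this branch sees is a key of dic, so a KeyError is unreachable there
  (PySem.Str.lower input1).toList.foldl
    (fun weight i =>
      if PySem.Chars.isalpha i then
        if input2 = 0 then
          if ¬ (i ∈ vow) then weight + dic.getD i 0 else weight
        else weight + dic.getD i 0
      else weight) 0

-- ===== PORT B =====
def Weight_of_String_alt (input1 : String) (input2 : Int) : Int :=
  let counts : PySem.Dict Char Int :=
    (PySem.Str.lower input1).toList.foldl (fun d ch => d.insert ch (d.getD ch 0 + 1)) PySem.Dict.empty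
  let letters : List Char :=
    if input2 ≠ 0 then "abcdefghijklmnopqrstuvwxyz".toList else "bcdfghjklmnpqrstvwxyz".toList
  letters.foldl (fun total c => total + counts.getD c 0 * ((c.toNat : Int) - 96)) 0

-- ===== PRECONDITION & SPEC =====
def Spec_Weight_of_String (input1 : String) (input2 : Int) (out : Int) : Prop := out = Weight_of_String_alt input1 input2
instance (input1 : String) (input2 : Int) (out : Int) : Decidable (Spec_Weight_of_String input1 input2 out) := by unfold Spec_Weight_of_String; infer_instance

-- ===== CLAIM (what is proved, stated in full; the proofs are below) =====
def Claim_equal_Weight_of_String : Prop := ∀ (input1 : String) (input2 : Int), Dom_Weight_of_String input1 input2 → Spec_Weight_of_String input1 input2 (Weight_of_String input1 input2)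

-- ===== LEMMAS AND PROOFS =====

-- the per-character contribution of A's loop body, with z = (input2 = 0)
def pvStepA (z : Bool) (c : Char) : Int :=
  if PySem.Chars.isalpha c then
    if z then
      if ¬ (c ∈ "aeiou".toList) then
        (PySem.Dict.ofList
          ((['a','b','c','d','e','f','g','h','i','j','k','l','m','n','o','p','q','r','s','t','u','v','w','x','y','z']).zip
           ([1,2,3,4,5,6,7,8,9,10,11,12,13,14,15,16,17,18,19,20,21,22,23,24,25,26] : List Int))).getD c 0
      else 0
    else
      (PySem.Dict.ofList
        ((['a','b','c','d','e','f','g','h','i','j','k','l','m','n','o','p','q','r','s','t','u','v','w','x','y','z']).zip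
         ([1,2,3,4,5,6,7,8,9,10,11,12,13,14,15,16,17,18,19,20,21,22,23,24,25,26] : List Int))).getD c 0
  else 0

-- B's letter list, with z = (input2 = 0)
def pvLetters (z : Bool) : List Char :=
  if z then "bcdfghjklmnpqrstvwxyz".toList else "abcdefghijklmnopqrstuvwxyz".toList

-- a 0/w-indicator summed over a Nodup list picks out the single member
theorem pv_sum_ite_mem (L : List Char) (hL : L.Nodup) (c : Char) (w : Char → Int) :
    (L.map (fun x => (if c = x then w x else 0))).sum = if c ∈ L then w c else 0 := by
  induction L with
  | nil => simp
  | cons a L ih =>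
    rcases List.nodup_cons.mp hL with ⟨ha, hL'⟩
    by_cases hca : c = a
    · subst hca
      simp [List.map_cons, ih hL', ha]
    · simp [List.map_cons, hca, ih hL', List.mem_cons]

-- summing count·weight over the distinct letters = summing the letter's weight over the characters
theorem pv_count_sum (L : List Char) (hL : L.Nodup) (w : Char → Int) (l : List Char) :
    (L.map (fun x => (l.count x : Int) * w x)).sum
      = (l.map (fun c => if c ∈ L then w c else 0)).sum := by
  induction l with
  | nil => simp
  | cons c l ih =>
    have hcc : ∀ x, ((c :: l).count x : Int) * w x
        = (l.count x : Int) * w x + (if c = x then w x else 0) := by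
      intro x
      by_cases h : c = x
      · subst h; simp [List.count_cons_self]; ring
      · simp [h]
    simp only [hcc, PySem.List.sum_map_add_int, ih, List.map_cons, List.sum_cons,
      pv_sum_ite_mem L hL c w]
    ring

-- on every character a printable-ASCII string can produce after .lower(), A's branch
-- contribution equals B's "included letter ↦ ord − 96" rule
set_option maxRecDepth 10000 in
theorem pv_step_char (z : Bool) (c : Char) (h : c.toNat ≤ 126) :
    pvStepA z (PySem.Chars.lowerChar c)
      = if PySem.Chars.lowerChar c ∈ pvLetters z
          then ((PySem.Chars.lowerChar c).toNat : Int) - 96 else 0 := by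
  have key : ∀ n : Nat, n < 127 →
      (pvStepA z (PySem.Chars.lowerChar (Char.ofNat n))
        = if PySem.Chars.lowerChar (Char.ofNat n) ∈ pvLetters z
            then (((PySem.Chars.lowerChar (Char.ofNat n)).toNat : Int) - 96) else 0) := by
    cases z <;> decide
  have := key c.toNat (by omega)
  rwa [Char.ofNat_toNat c] at this

theorem pv_letters_nodup (z : Bool) : (pvLetters z).Nodup := by cases z <;> decide

-- A's foldl, rewritten as a sum of per-character contributions
theorem pv_foldA (input2 : Int) (l : List Char) :
    l.foldl
      (fun weight i =>
        if PySem.Chars.isalpha i then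
          if input2 = 0 then
            if ¬ (i ∈ "aeiou".toList) then
              weight + (PySem.Dict.ofList
                ((['a','b','c','d','e','f','g','h','i','j','k','l','m','n','o','p','q','r','s','t','u','v','w','x','y','z']).zip
                 ([1,2,3,4,5,6,7,8,9,10,11,12,13,14,15,16,17,18,19,20,21,22,23,24,25,26] : List Int))).getD i 0
            else weight
          else weight + (PySem.Dict.ofList
            ((['a','b','c','d','e','f','g','h','i','j','k','l','m','n','o','p','q','r','s','t','u','v','w','x','y','z']).zip
             ([1,2,3,4,5,6,7,8,9,10,11,12,13,14,15,16,17,18,19,20,21,22,23,24,25,26] : List Int))).getD i 0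
        else weight) 0
      = (l.map (pvStepA (decide (input2 = 0)))).sum := by
  have hstep : (fun (weight : Int) (i : Char) =>
        if PySem.Chars.isalpha i then
          if input2 = 0 then
            if ¬ (i ∈ "aeiou".toList) then
              weight + (PySem.Dict.ofList
                ((['a','b','c','d','e','f','g','h','i','j','k','l','m','n','o','p','q','r','s','t','u','v','w','x','y','z']).zip
                 ([1,2,3,4,5,6,7,8,9,10,11,12,13,14,15,16,17,18,19,20,21,22,23,24,25,26] : List Int))).getD i 0
            else weight
          else weight + (PySem.Dict.ofList
            ((['a','b','c','d','e','f','g','h','i','j','k','l','m','n','o','p','q','r','s','t','u','v','w','x','y','z']).zip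
             ([1,2,3,4,5,6,7,8,9,10,11,12,13,14,15,16,17,18,19,20,21,22,23,24,25,26] : List Int))).getD i 0
        else weight)
      = fun (weight : Int) (i : Char) => weight + pvStepA (decide (input2 = 0)) i := by
    funext w i
    simp only [pvStepA, decide_eq_true_eq]
    split_ifs <;> simp
  rw [hstep, PySem.List.foldl_add, zero_add]

-- ===== VERDICT (by name: the statement is the Claim_ definition above) =====
theorem Weight_of_String_spec : Claim_equal_Weight_of_String := by
  intro input1 input2 hdom
  have hchars : ∀ c ∈ input1.toList, c.toNat ≤ 126 := by
    intro c hc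
    have h1 : pvDomStr input1 = true := by
      revert hdom; unfold Dom_Weight_of_String; cases pvDomStr input1 <;> simp
    have := (List.all_eq_true.mp h1) c hc
    unfold pvDomChar at this
    simp only [Bool.or_eq_true, Bool.and_eq_true, decide_eq_true_eq, beq_iff_eq,
      Nat.le_iff_lt_add_one] at this
    omega
  unfold Spec_Weight_of_String Weight_of_String Weight_of_String_alt
  simp only []
  have hlet : (if input2 ≠ 0 then ("abcdefghijklmnopqrstuvwxyz".toList : List Char)
        else "bcdfghjklmnpqrstvwxyz".toList) = pvLetters (decide (input2 = 0)) := by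
    by_cases h0 : input2 = 0 <;> simp [pvLetters, h0]
  rw [pv_foldA, hlet, PySem.Dict.foldl_insert_getD_add_one_eq_counter, PySem.List.foldl_add,
    zero_add]
  simp only [PySem.Dict.getD_counter]
  rw [pv_count_sum (pvLetters (decide (input2 = 0)))
      (pv_letters_nodup (decide (input2 = 0))) (fun c => ((c.toNat : Int) - 96))]
  have hlow : (PySem.Str.lower input1).toList = input1.toList.map PySem.Chars.lowerChar := by
    simp [pysem, PySem.Chars.lower]
  rw [hlow, List.map_map, List.map_map]
  refine congrArg _ (List.map_congr_left ?_)
  intro a ha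
  exact pv_step_char (decide (input2 = 0)) a (hchars a ha)
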